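-- pv_equiv track=rewrite | github.com/xiaoAices-mmmmm/-csv- | reader_csv.py | assert_result
-- ===== SOURCE A (Python) =====
-- def assert_result(dict1:dict, dict2:dict, key_list):
--     flag = True
--     keys1 = dict1.keys()
--     keys2 = dict2.keys()
--     if len(key_list) != 0:
--         for key in key_list:
--             if key in keys1 and key in keys2:
--                 if dict1[key] == dict2[key]:
--                     flag = flag & True
--                 else:
--                     flag = flag & False
--             else:
--                 raise Exception('key_list contains error key')
--     else:
--         raise Exception('key_list is null')
--     if flag:
--         result = 'PASS'
--     else:
--         result = 'FAILED'
--     return result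
-- ===== SOURCE B (Python) =====
-- def assert_result(dict1: dict, dict2: dict, key_list):
--     if not key_list:
--         raise Exception('key_list is null')
--     if not set(key_list) <= dict1.keys() & dict2.keys():
--         raise Exception('key_list contains error key')
--     return 'PASS' if {k: dict1[k] for k in key_list} == {k: dict2[k] for k in key_list} else 'FAILED'
-- ===== Notes on version B (the rewrite author's own statement) =====
-- stated objective: alternative
-- what changed: Replaces A's single interleaved per-key loop carrying a boolean flag (validate-and-compare each key, flag&True/flag&False) by set-inclusion validation (set(key_list) <= dict1.keys() & dict2.keys()) and a wholesale equality test of two projected dict comprehensions {k: d[k] for k in key_list}.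
import Mathlib
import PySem

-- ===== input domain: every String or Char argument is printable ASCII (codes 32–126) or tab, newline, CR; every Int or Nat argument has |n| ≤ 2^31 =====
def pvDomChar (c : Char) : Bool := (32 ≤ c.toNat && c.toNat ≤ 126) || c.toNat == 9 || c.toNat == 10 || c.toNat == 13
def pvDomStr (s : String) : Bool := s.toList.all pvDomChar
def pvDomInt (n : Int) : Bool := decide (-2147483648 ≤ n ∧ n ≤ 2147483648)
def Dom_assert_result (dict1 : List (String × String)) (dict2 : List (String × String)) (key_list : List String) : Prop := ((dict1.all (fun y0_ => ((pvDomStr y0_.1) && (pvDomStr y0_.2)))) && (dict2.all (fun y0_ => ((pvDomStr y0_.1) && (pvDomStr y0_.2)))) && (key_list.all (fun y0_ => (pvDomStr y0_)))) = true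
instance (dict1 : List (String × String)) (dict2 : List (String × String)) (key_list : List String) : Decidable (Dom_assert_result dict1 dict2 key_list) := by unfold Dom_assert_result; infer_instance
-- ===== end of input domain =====

-- B replaces A's single interleaved validate-and-compare loop with a boolean flag by a
-- set-inclusion validation (set(key_list) <= dict1.keys() & dict2.keys()) followed by a
-- wholesale comparison of two projected dict comprehensions; objective: alternative, same cost.


-- ===== PORT A =====
-- A's for-loop: carries the boolean flag; `none` marks the 'key_list contains error key' exception.
def assertLoopA (d1 d2 : PySem.Dict String String) : List String → Bool → Option Bool
  | [], flag => some flag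
  | k :: ks, flag =>
    if d1.contains k && d2.contains k then
      if d1.getD k "" = d2.getD k "" then
        assertLoopA d1 d2 ks (flag && true)
      else
        assertLoopA d1 d2 ks (flag && false)
    else none

def assert_result (dict1 : List (String × String)) (dict2 : List (String × String)) (key_list : List String) : String :=
  let dd1 : PySem.Dict String String := PySem.Dict.mk dict1
  let dd2 : PySem.Dict String String := PySem.Dict.mk dict2
  if key_list.length ≠ 0 then
    match assertLoopA dd1 dd2 key_list true with
    | some flag => if flag then "PASS" else "FAILED"
    | none => ""           -- Exception 'key_list contains error key' (outside Pre_)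
  else ""                  -- Exception 'key_list is null' (outside Pre_)

-- ===== PORT B =====
-- {k: d[k] for k in ks} : dict comprehension (insert overwrites in place, new keys append)
def projDict (d : PySem.Dict String String) (ks : List String) : PySem.Dict String String :=
  ks.foldl (fun acc k => acc.insert k (d.getD k "")) PySem.Dict.empty

def assert_result_alt (dict1 : List (String × String)) (dict2 : List (String × String)) (key_list : List String) : String :=
  let dd1 : PySem.Dict String String := PySem.Dict.mk dict1
  let dd2 : PySem.Dict String String := PySem.Dict.mk dict2
  if key_list = [] then ""                                              -- raise 'key_list is null' (outside Pre_)
  else if PySem.Set.issubset (PySem.Set.ofList key_list) (PySem.Set.inter dd1.keys dd2.keys) then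
    -- Python's dict == ignores insertion order; comparing the dicts directly is exact here
    -- because both comprehensions iterate the SAME key sequence, so their key orders coincide.
    if projDict dd1 key_list = projDict dd2 key_list then "PASS" else "FAILED"
  else ""                                                               -- raise 'key_list contains error key' (outside Pre_)

-- ===== PRECONDITION & SPEC =====
-- Pre_ excludes exactly the inputs on which the Python A raises (empty key_list, or a key
-- missing from either dict); B raises the same exceptions there.
def Pre_assert_result (dict1 : List (String × String)) (dict2 : List (String × String)) (key_list : List String) : Prop :=
  key_list ≠ [] ∧ ∀ k ∈ key_list, k ∈ dict1.map Prod.fst ∧ k ∈ dict2.map Prod.fst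
instance (dict1 : List (String × String)) (dict2 : List (String × String)) (key_list : List String) : Decidable (Pre_assert_result dict1 dict2 key_list) := by unfold Pre_assert_result; infer_instance

def pvWitness_assert_result : (List (String × String)) × (List (String × String)) × List String :=
  ([("a", "1"), ("b", "2")], [("a", "1"), ("b", "3")], ["a", "b"])

def Spec_assert_result (dict1 : List (String × String)) (dict2 : List (String × String)) (key_list : List String) (out : String) : Prop := out = assert_result_alt dict1 dict2 key_list
instance (dict1 : List (String × String)) (dict2 : List (String × String)) (key_list : List String) (out : String) : Decidable (Spec_assert_result dict1 dict2 key_list out) := by unfold Spec_assert_result; infer_instance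

-- ===== CLAIM (what is proved, stated in full; the proofs are below) =====
def Claim_equal_assert_result : Prop := ∀ (dict1 : List (String × String)) (dict2 : List (String × String)) (key_list : List String), Dom_assert_result dict1 dict2 key_list → Pre_assert_result dict1 dict2 key_list → Spec_assert_result dict1 dict2 key_list (assert_result dict1 dict2 key_list)

-- ===== LEMMAS AND PROOFS =====

-- membership in the key column ↔ Dict.contains
theorem contains_mk_eq_mem {d : List (String × String)} {k : String} :
    (PySem.Dict.mk d).contains k = true ↔ k ∈ d.map Prod.fst := by
  simp [PySem.Dict.contains, List.any_eq_true]

-- A's loop, when every key is present in both dicts, returns the conjunction of the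
-- per-key value comparisons folded onto the incoming flag.
theorem assertLoopA_all (d1 d2 : PySem.Dict String String) (ks : List String) (flag : Bool)
    (h : ∀ k ∈ ks, d1.contains k = true ∧ d2.contains k = true) :
    assertLoopA d1 d2 ks flag = some (flag && ks.all (fun k => d1.getD k "" == d2.getD k "")) := by
  induction ks generalizing flag with
  | nil => simp [assertLoopA]
  | cons k ks ih =>
    obtain ⟨h1, h2⟩ := h k (by simp)
    have hrest : ∀ k' ∈ ks, d1.contains k' = true ∧ d2.contains k' = true :=
      fun k' hk' => h k' (by simp [hk'])
    by_cases heq : d1.getD k "" = d2.getD k ""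
    · simp [assertLoopA, h1, h2, heq, ih _ hrest]
    · simp [assertLoopA, h1, h2, heq, ih _ hrest]

-- lookup in the comprehension {k: d[k] for k in ks}
theorem getD_projDict (d : PySem.Dict String String) (ks : List String) (k : String) :
    (projDict d ks).getD k "" = if k ∈ ks then d.getD k "" else "" := by
  induction ks using List.reverseRecOn with
  | nil => simp [projDict, PySem.Dict.getD_empty]
  | append_singleton ks a ih =>
    simp only [projDict, List.foldl_append, List.foldl_cons, List.foldl_nil]
    rw [PySem.Dict.getD_insert]
    by_cases hk : k = a
    · simp [hk]
    · simp only [projDict] at ih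
      simp [hk, ih, List.mem_append]

theorem keys_projDict (d : PySem.Dict String String) (ks : List String) :
    (projDict d ks).keys = PySem.Set.ofList ks := by
  simp [projDict, PySem.Dict.keys_foldl_insert, PySem.Dict.keys_empty,
        PySem.Set.update_nil_left]

theorem nodup_keys_projDict (d : PySem.Dict String String) (ks : List String) :
    (projDict d ks).keys.Nodup := by
  rw [keys_projDict]; exact PySem.Set.nodup_ofList ks

-- the two projected comprehensions are equal iff the values agree key by key
theorem projDict_eq_iff (d1 d2 : PySem.Dict String String) (ks : List String) :
    projDict d1 ks = projDict d2 ks ↔ ∀ k ∈ ks, d1.getD k "" = d2.getD k "" := by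
  constructor
  · intro h k hk
    have := congrArg (fun d => PySem.Dict.getD d k "") h
    simpa [getD_projDict, hk] using this
  · intro h
    apply PySem.Dict.ext
    rw [PySem.Dict.items_eq_map_keys _ (nodup_keys_projDict d1 ks) "",
        PySem.Dict.items_eq_map_keys _ (nodup_keys_projDict d2 ks) "",
        keys_projDict, keys_projDict]
    apply List.map_congr_left
    intro k hk
    have hk' : k ∈ ks := (PySem.Set.mem_ofList _ _).mp hk
    simp [getD_projDict, hk', h k hk']

-- ===== VERDICT (by name: the statement is the Claim_ definition above) =====
theorem assert_result_spec : Claim_equal_assert_result := by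
  intro dict1 dict2 key_list _ hpre
  obtain ⟨hne, hmem⟩ := hpre
  have hcont : ∀ k ∈ key_list,
      (PySem.Dict.mk dict1).contains k = true ∧ (PySem.Dict.mk dict2).contains k = true := by
    intro k hk
    exact ⟨contains_mk_eq_mem.mpr (hmem k hk).1, contains_mk_eq_mem.mpr (hmem k hk).2⟩
  have hsub : PySem.Set.issubset (PySem.Set.ofList key_list)
      (PySem.Set.inter (PySem.Dict.mk dict1).keys (PySem.Dict.mk dict2).keys) = true := by
    rw [PySem.Set.issubset_iff]
    intro k hk
    have hk' : k ∈ key_list := (PySem.Set.mem_ofList _ _).mp hk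
    rw [PySem.Set.mem_inter]
    exact ⟨(PySem.Dict.contains_iff_mem_keys _ _).mp (hcont k hk').1,
           (PySem.Dict.contains_iff_mem_keys _ _).mp (hcont k hk').2⟩
  have hlen : key_list.length ≠ 0 := by simpa using hne
  unfold Spec_assert_result assert_result assert_result_alt
  rw [if_pos hlen, assertLoopA_all _ _ _ _ hcont, if_neg hne, if_pos hsub]
  by_cases hall : ∀ k ∈ key_list,
      (PySem.Dict.mk dict1).getD k "" = (PySem.Dict.mk dict2).getD k ""
  · have hallb : key_list.all
        (fun k => (PySem.Dict.mk dict1).getD k "" == (PySem.Dict.mk dict2).getD k "") = true := by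
      simp only [List.all_eq_true, beq_iff_eq]; exact hall
    rw [if_pos ((projDict_eq_iff _ _ _).mpr hall)]
    simp [hallb]
  · have hallb : key_list.all
        (fun k => (PySem.Dict.mk dict1).getD k "" == (PySem.Dict.mk dict2).getD k "") = false := by
      rw [Bool.eq_false_iff]
      intro h
      exact hall (by simpa [List.all_eq_true] using h)
    rw [if_neg (fun h => hall ((projDict_eq_iff _ _ _).mp h))]
    simp [hallb]
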